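-- pv_equiv track=rewrite | github.com/AdamH12113/AdventOfCode2023 | Day13.py | find_symmetry
-- ===== SOURCE A (Python) =====
-- def compare_rows(grid: list, y1: int, y2: int):
-- 	for x in range(len(grid[0])):
-- 		if grid[y1][x] != grid[y2][x]:
-- 			return False
-- 	return True
--
-- def compare_cols(grid: list, x1: int, x2: int):
-- 	for y in range(len(grid)):
-- 		if grid[y][x1] != grid[y][x2]:
-- 			return False
-- 	return True
--
-- def check_horizontal_symmetry(grid: list, xs: int):
-- 	dist = min(xs, len(grid[0]) - xs)
-- 	for r in range(1, dist + 1):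
-- 		if not compare_cols(grid, xs - r, xs + r - 1):
-- 			return False
-- 	return True
--
-- def check_vertical_symmetry(grid: list, ys: int):
-- 	dist = min(ys, len(grid) - ys)
-- 	for r in range(1, dist + 1):
-- 		if not compare_rows(grid, ys - r, ys + r - 1):
-- 			return False
-- 	return True
--
-- def find_symmetry(grid: list):
-- 	for x in range(1, len(grid[0])):
-- 		if check_horizontal_symmetry(grid, x):
-- 			return x
--
-- 	for y in range(1, len(grid)):
-- 		if check_vertical_symmetry(grid, y):
-- 			return 100*y
-- 	return 0
-- ===== SOURCE B (Python) =====
-- def _intern(ids, keys):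
-- 	# Canonical numbering: one dict assigns each distinct row/column string a
-- 	# small integer id the first time it is seen.
-- 	out = []
-- 	for key in keys:
-- 		out.append(ids.setdefault(key, len(ids)))
-- 	return out
--
-- def _edge_palindrome(ids, k):
-- 	# Axis k is a mirror line iff the maximal window around it -- which always
-- 	# touches an edge -- reads the same backwards.
-- 	n = len(ids)
-- 	seg = ids[2*k - n:] if 2*k > n else ids[:2*k]
-- 	return seg == seg[::-1]
--
-- def find_symmetry(grid):
-- 	# Hash columns and rows to integer ids once, then look for an edge-anchored
-- 	# even palindrome in each id sequence; no per-axis character comparisons.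
-- 	w = len(grid[0])
-- 	h = len(grid)
-- 	ids = {}
-- 	col_ids = _intern(ids, [''.join(grid[y][x] for y in range(h)) for x in range(w)])
-- 	row_ids = _intern(ids, [row[:w] for row in grid])
-- 	for k in range(1, w):
-- 		if _edge_palindrome(col_ids, k):
-- 			return k
-- 	for k in range(1, h):
-- 		if _edge_palindrome(row_ids, k):
-- 			return 100 * k
-- 	return 0
-- ===== Notes on version B (the rewrite author's own statement) =====
-- stated objective: alternative
-- what changed: B hashes every column and row to a small integer id with one dict built in a single pass, then finds a mirror axis as an edge-anchored even palindrome in the id sequence (one whole-segment reversal test per axis), so A's per-axis radius loops with per-character column/row comparisons disappear.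
-- outside the precondition, e.g. on find_symmetry(['ab', 'a']): A raises IndexError, B raises IndexError; on find_symmetry(['ab', 'ba', 'x']): A returns 0, B raises IndexError
import Mathlib
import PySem

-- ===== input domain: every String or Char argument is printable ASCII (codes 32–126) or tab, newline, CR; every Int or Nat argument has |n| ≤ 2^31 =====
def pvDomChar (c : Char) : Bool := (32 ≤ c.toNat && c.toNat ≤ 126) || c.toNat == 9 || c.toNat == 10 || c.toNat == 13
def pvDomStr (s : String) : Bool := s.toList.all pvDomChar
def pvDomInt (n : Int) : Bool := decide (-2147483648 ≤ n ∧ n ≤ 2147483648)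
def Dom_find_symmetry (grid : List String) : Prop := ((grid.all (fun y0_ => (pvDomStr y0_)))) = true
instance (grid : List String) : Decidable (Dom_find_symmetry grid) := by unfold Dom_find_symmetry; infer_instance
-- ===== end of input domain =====

-- B hashes every column and row to a small integer id with one dict and finds a
-- mirror axis as an edge-anchored even palindrome in the id sequence, instead of
-- A's per-axis radius loops of per-character comparisons (alternative algorithm).

-- ===== PORT A =====
-- grid[y][x] (both indices nonnegative and in range on every admitted input)
def pvChar (grid : List String) (y x : Nat) : Char := ((grid.getD y "").toList).getD x ' '

-- len(grid[0])
def pvW (grid : List String) : Nat := (grid.headD "").toList.length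

def pvCompareRows (grid : List String) (y1 y2 : Nat) : Bool :=
  (List.range (pvW grid)).all (fun x => pvChar grid y1 x == pvChar grid y2 x)

def pvCompareCols (grid : List String) (x1 x2 : Nat) : Bool :=
  (List.range grid.length).all (fun y => pvChar grid y x1 == pvChar grid y x2)

def pvCheckH (grid : List String) (xs : Nat) : Bool :=
  (List.range' 1 (min xs (pvW grid - xs))).all
    (fun r => pvCompareCols grid (xs - r) (xs + r - 1))

def pvCheckV (grid : List String) (ys : Nat) : Bool :=
  (List.range' 1 (min ys (grid.length - ys))).all
    (fun r => pvCompareRows grid (ys - r) (ys + r - 1))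

def find_symmetry (grid : List String) : Int :=
  match (List.range' 1 (pvW grid - 1)).find? (fun x => pvCheckH grid x) with
  | some x => (x : Int)
  | none =>
    match (List.range' 1 (grid.length - 1)).find? (fun y => pvCheckV grid y) with
    | some y => 100 * (y : Int)
    | none => 0

-- ===== PORT B =====
-- out.append(ids.setdefault(key, len(ids)))  — one step of _intern
def pvInternStep (st : PySem.Dict String Int × List Int) (key : String) :
    PySem.Dict String Int × List Int :=
  (st.1.setdefault key (st.1.size : Int), st.2 ++ [(st.1.get? key).getD (st.1.size : Int)])

-- _intern(ids, keys): mutated dict together with the list of assigned ids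
def pvIntern (ids : PySem.Dict String Int) (keys : List String) :
    PySem.Dict String Int × List Int :=
  keys.foldl pvInternStep (ids, [])

-- [''.join(grid[y][x] for y in range(h)) for x in range(w)]
def pvColKeys (grid : List String) : List String :=
  (List.range ((grid.headD "").toList.length)).map
    (fun x => String.ofList (grid.map (fun s => s.toList.getD x ' ')))

-- [row[:w] for row in grid]
def pvRowKeys (grid : List String) : List String :=
  grid.map (fun s => String.ofList (s.toList.take ((grid.headD "").toList.length)))

-- _edge_palindrome(ids, k): the maximal window around axis k touches an edge
def pvEdgePal (ids : List Int) (k : Nat) : Bool :=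
  let seg := if 2 * k > ids.length then ids.drop (2 * k - ids.length) else ids.take (2 * k)
  seg == seg.reverse

def find_symmetry_alt (grid : List String) : Int :=
  -- w = len(grid[0]); st1 = (ids, col_ids) after the column pass; st2 after rows
  match (List.range' 1 ((grid.headD "").toList.length - 1)).find?
      (fun k => pvEdgePal (pvIntern PySem.Dict.empty (pvColKeys grid)).2 k) with
  | some x => (x : Int)
  | none =>
    match (List.range' 1 (grid.length - 1)).find?
        (fun k => pvEdgePal (pvIntern (pvIntern PySem.Dict.empty (pvColKeys grid)).1 (pvRowKeys grid)).2 k) with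
    | some y => 100 * (y : Int)
    | none => 0

-- ===== PRECONDITION & SPEC =====
-- Pre_ excludes the empty grid, where A raises IndexError (grid[0]), and ragged
-- grids with a row shorter than the first row: there A usually raises IndexError
-- too, and when it happens to return (a mismatch is found before the short index
-- is read) that value is an artefact of A's scan order, while B's upfront column
-- build reads every cell and raises.
def Pre_find_symmetry (grid : List String) : Prop :=
  grid ≠ [] ∧ ∀ s ∈ grid, (grid.headD "").toList.length ≤ s.toList.length
instance (grid : List String) : Decidable (Pre_find_symmetry grid) := by
  unfold Pre_find_symmetry; infer_instance

def pvWitness_find_symmetry : List String := ["#.", "#."]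

def Spec_find_symmetry (grid : List String) (out : Int) : Prop := out = find_symmetry_alt grid
instance (grid : List String) (out : Int) : Decidable (Spec_find_symmetry grid out) := by unfold Spec_find_symmetry; infer_instance

-- ===== CLAIM (what is proved, stated in full; the proofs are below) =====
def Claim_equal_find_symmetry : Prop := ∀ (grid : List String), Dom_find_symmetry grid → Pre_find_symmetry grid → Spec_find_symmetry grid (find_symmetry grid)

-- ===== LEMMAS AND PROOFS =====

theorem pvFindCongr {α : Type} (p q : α → Bool) (l : List α)
    (h : ∀ a ∈ l, p a = q a) : l.find? p = l.find? q := by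
  induction l with
  | nil => rfl
  | cons a l ih =>
    simp only [List.find?]
    rw [h a (by simp)]
    cases q a with
    | true => rfl
    | false => exact ih (fun b hb => h b (by simp [hb]))

theorem pvAllCongr {α : Type} (p q : α → Bool) (l : List α)
    (h : ∀ a ∈ l, p a = q a) : l.all p = l.all q := by
  induction l with
  | nil => rfl
  | cons a l ih => simp [List.all_cons, h a (by simp), ih (fun b hb => h b (by simp [hb]))]

-- list equality as a pointwise scan, given both lengths
theorem pvAllBeq (l1 l2 : List Char) (n : Nat) (h1 : l1.length = n) (h2 : l2.length = n) :
    (l1 = l2) ↔ ((List.range n).all (fun i => l1.getD i ' ' == l2.getD i ' ') = true) := by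
  simp only [List.all_eq_true, List.mem_range, beq_iff_eq]
  constructor
  · intro h i _; rw [h]
  · intro h
    apply List.ext_getElem (by omega)
    intro i hi1 hi2
    have := h i (by omega)
    rwa [List.getD_eq_getElem?_getD, List.getD_eq_getElem?_getD,
      List.getElem?_eq_getElem hi1, List.getElem?_eq_getElem hi2] at this

-- ---- the interning dict: values below size, no two keys share a value ----
def pvGood (d : PySem.Dict String Int) : Prop :=
  (∀ k v, d.get? k = some v → v < (d.size : Int)) ∧
  (∀ k1 k2 v, d.get? k1 = some v → d.get? k2 = some v → k1 = k2)

theorem pvGood_empty : pvGood PySem.Dict.empty := by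
  constructor <;> intro k <;> intros <;> simp_all [PySem.Dict.get?_empty]

theorem pvGood_setdefault (d : PySem.Dict String Int) (key : String)
    (h : pvGood d) : pvGood (d.setdefault key (d.size : Int)) := by
  cases hc : d.contains key with
  | true => rwa [PySem.Dict.setdefault_of_contains d _ hc]
  | false =>
    rw [PySem.Dict.setdefault_of_not_contains d _ hc]
    constructor
    · intro k v hv
      rw [PySem.Dict.get?_insert] at hv
      rw [PySem.Dict.size_insert, hc, if_neg (by simp)]
      split_ifs at hv with hk
      · cases hv; push_cast; omega
      · have := h.1 k v hv; push_cast at this ⊢; omega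
    · intro k1 k2 v h1 h2
      rw [PySem.Dict.get?_insert] at h1 h2
      split_ifs at h1 h2 with e1 e2 e2
      · rw [e1, e2]
      · cases h1; have := h.1 k2 _ h2; omega
      · cases h2; have := h.1 k1 _ h1; omega
      · exact h.2 k1 k2 v h1 h2

theorem pvGet?_setdefault_mono (d : PySem.Dict String Int) (key k : String) (v : Int)
    (h : d.get? k = some v) : (d.setdefault key (d.size : Int)).get? k = some v := by
  cases hc : d.contains key with
  | true => rwa [PySem.Dict.setdefault_of_contains d _ hc]
  | false =>
    rw [PySem.Dict.setdefault_of_not_contains d _ hc, PySem.Dict.get?_insert]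
    split_ifs with hk
    · subst hk
      rw [PySem.Dict.contains_eq_isSome_get?, h] at hc
      simp at hc
    · exact h

-- everything the equivalence needs about _intern, in one induction
theorem pvIntern_spec (keys : List String) :
    ∀ (d : PySem.Dict String Int) (acc : List Int), pvGood d →
    pvGood (keys.foldl pvInternStep (d, acc)).1 ∧
    (keys.foldl pvInternStep (d, acc)).2.length = acc.length + keys.length ∧
    (∀ k v, d.get? k = some v → (keys.foldl pvInternStep (d, acc)).1.get? k = some v) ∧
    (∀ j, j < acc.length → (keys.foldl pvInternStep (d, acc)).2.getD j 0 = acc.getD j 0) ∧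
    (∀ i, i < keys.length → (keys.foldl pvInternStep (d, acc)).1.get? (keys.getD i "") =
      some ((keys.foldl pvInternStep (d, acc)).2.getD (acc.length + i) 0)) := by
  induction keys with
  | nil =>
    intro d acc hg
    exact ⟨hg, by simp, fun k v h => h, fun j _ => rfl, fun i hi => by simp at hi⟩
  | cons key ks ih =>
    intro d acc hg
    have hstep : (key :: ks).foldl pvInternStep (d, acc)
        = ks.foldl pvInternStep (d.setdefault key (d.size : Int),
            acc ++ [(d.get? key).getD (d.size : Int)]) := rfl
    obtain ⟨ig, ilen, imono, ipre, ivals⟩ :=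
      ih (d.setdefault key (d.size : Int)) (acc ++ [(d.get? key).getD (d.size : Int)])
        (pvGood_setdefault d key hg)
    rw [hstep]
    refine ⟨ig, by rw [ilen]; simp; omega, ?_, ?_, ?_⟩
    · intro k v h; exact imono k v (pvGet?_setdefault_mono d key k v h)
    · intro j hj
      rw [ipre j (by simp; omega), List.getD_eq_getElem?_getD,
        List.getElem?_append_left hj, ← List.getD_eq_getElem?_getD]
    · intro i hi
      cases i with
      | zero =>
        have h0 := imono key _ (PySem.Dict.get?_setdefault_self d key (d.size : Int))
        rw [show ((key :: ks).getD 0 "") = key from rfl, Nat.add_zero, h0]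
        congr 1
        rw [ipre acc.length (by simp), List.getD_eq_getElem?_getD,
          List.getElem?_append_right (le_refl _)]
        simp
      | succ i =>
        simp only [List.length_cons] at hi
        have hv := ivals i (by omega)
        have hidx : (acc ++ [(d.get? key).getD (d.size : Int)]).length + i
            = acc.length + (i + 1) := by simp; omega
        rw [show ((key :: ks).getD (i+1) "") = ks.getD i "" from rfl, ← hidx, hv]

-- equal ids ↔ equal keys, for any intern output
theorem pvIds_eq (D : PySem.Dict String Int) (K : List String) (out : List Int)
    (hg : pvGood D) (hvals : ∀ i, i < K.length → D.get? (K.getD i "") = some (out.getD i 0))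
    (a b : Nat) (ha : a < K.length) (hb : b < K.length) :
    (out.getD a 0 == out.getD b 0) = (K.getD a "" == K.getD b "") := by
  rw [Bool.eq_iff_iff]
  simp only [beq_iff_eq]
  constructor
  · intro h
    exact hg.2 _ _ _ (hvals a ha) (h ▸ hvals b hb)
  · intro h
    have := hvals a ha
    rw [h, hvals b hb] at this
    exact (Option.some.injEq _ _).mp this.symm

-- ---- the edge-anchored palindrome test as A's radius scan ----
theorem pvPalindrome_iff (l : List Int) :
    (l = l.reverse) ↔ ∀ i, i < l.length → l.getD i 0 = l.getD (l.length - 1 - i) 0 := by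
  constructor
  · intro h i hi
    conv_lhs => rw [h]
    rw [List.getD_eq_getElem?_getD, List.getD_eq_getElem?_getD,
      List.getElem?_eq_getElem (by simpa using hi),
      List.getElem?_eq_getElem (by omega : l.length - 1 - i < l.length)]
    simp [List.getElem_reverse]
  · intro h
    apply List.ext_getElem (by simp)
    intro i hi1 hi2
    have := h i hi1
    rw [List.getD_eq_getElem?_getD, List.getD_eq_getElem?_getD,
      List.getElem?_eq_getElem hi1,
      List.getElem?_eq_getElem (by omega : l.length - 1 - i < l.length)] at this
    rw [List.getElem_reverse]
    exact this

theorem pvEdgePal_eq (L : List Int) (k : Nat) (hk1 : 1 ≤ k) (hk : k < L.length) :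
    pvEdgePal L k =
      (List.range' 1 (min k (L.length - k))).all
        (fun r => L.getD (k - r) 0 == L.getD (k + r - 1) 0) := by
  have hseg : (if 2 * k > L.length then L.drop (2 * k - L.length) else L.take (2 * k))
      = (L.drop (k - min k (L.length - k))).take (2 * min k (L.length - k)) := by
    split_ifs with h2
    · have hmin : min k (L.length - k) = L.length - k := by omega
      rw [hmin, show k - (L.length - k) = 2 * k - L.length from by omega]
      rw [List.take_of_length_le (by simp; omega)]
    · have hmin : min k (L.length - k) = k := by omega
      rw [hmin]
      simp
  set d := min k (L.length - k) with hd
  set off := k - d with hoff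
  have hoffd : off + 2 * d ≤ L.length := by omega
  have hlen : ((L.drop off).take (2 * d)).length = 2 * d := by
    simp; omega
  have hget : ∀ i, i < 2 * d → ((L.drop off).take (2 * d)).getD i 0 = L.getD (off + i) 0 := by
    intro i hi
    rw [List.getD_eq_getElem?_getD, List.getD_eq_getElem?_getD,
      List.getElem?_eq_getElem (by omega : i < ((L.drop off).take (2*d)).length),
      List.getElem?_eq_getElem (by omega : off + i < L.length)]
    simp only [Option.getD_some]
    rw [List.getElem_take, List.getElem_drop]
  rw [Bool.eq_iff_iff]
  unfold pvEdgePal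
  rw [hseg]
  simp only [beq_iff_eq, List.all_eq_true, List.mem_range'_1]
  rw [pvPalindrome_iff, hlen]
  constructor
  · intro h r ⟨hr1, hr2⟩
    have := h (d - r) (by omega)
    rw [hget _ (by omega), hget _ (by omega)] at this
    rw [show off + (d - r) = k - r from by omega,
      show off + (2 * d - 1 - (d - r)) = k + r - 1 from by omega] at this
    exact this
  · intro h i hi
    rw [hget _ hi, hget _ (by omega)]
    by_cases hid : i < d
    · have := h (d - i) ⟨by omega, by omega⟩
      rw [show k - (d - i) = off + i from by omega,
        show k + (d - i) - 1 = off + (2 * d - 1 - i) from by omega] at this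
      exact this
    · have := h (i - d + 1) ⟨by omega, by omega⟩
      rw [show k - (i - d + 1) = off + (2 * d - 1 - i) from by omega,
        show k + (i - d + 1) - 1 = off + i from by omega] at this
      exact this.symm

-- ---- keys vs A's per-character comparisons ----
theorem pvColKeys_length (grid : List String) : (pvColKeys grid).length = pvW grid := by
  simp [pvColKeys, pvW]

theorem pvRowKeys_length (grid : List String) : (pvRowKeys grid).length = grid.length := by
  simp [pvRowKeys]

theorem pvColKeys_getD (grid : List String) (x : Nat) (hx : x < pvW grid) :
    (pvColKeys grid).getD x "" = String.ofList (grid.map (fun s => s.toList.getD x ' ')) := by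
  unfold pvColKeys pvW at *
  rw [List.getD_eq_getElem?_getD, List.getElem?_map, List.getElem?_range hx]
  rfl

theorem pvColList_getD (grid : List String) (x y : Nat) (hy : y < grid.length) :
    (grid.map (fun s => s.toList.getD x ' ')).getD y ' ' = pvChar grid y x := by
  have hg : grid.getD y "" = grid[y] := by
    rw [List.getD_eq_getElem?_getD, List.getElem?_eq_getElem hy]; rfl
  unfold pvChar
  rw [hg, List.getD_eq_getElem?_getD, List.getElem?_map, List.getElem?_eq_getElem hy]
  rfl

theorem pvColKey_beq (grid : List String) (a b : Nat) (ha : a < pvW grid) (hb : b < pvW grid) :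
    ((pvColKeys grid).getD a "" == (pvColKeys grid).getD b "") = pvCompareCols grid a b := by
  have h : ∀ y ∈ List.range grid.length,
      ((grid.map (fun s => s.toList.getD a ' ')).getD y ' '
          == (grid.map (fun s => s.toList.getD b ' ')).getD y ' ')
        = (pvChar grid y a == pvChar grid y b) := by
    intro y hy; rw [List.mem_range] at hy
    rw [pvColList_getD grid a y hy, pvColList_getD grid b y hy]
  rw [pvColKeys_getD grid a ha, pvColKeys_getD grid b hb, Bool.eq_iff_iff, beq_iff_eq,
    String.ofList_inj, pvAllBeq _ _ grid.length (by simp) (by simp)]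
  unfold pvCompareCols
  rw [pvAllCongr _ _ _ h]

theorem pvRowKeys_getD (grid : List String) (y : Nat) (hy : y < grid.length) :
    (pvRowKeys grid).getD y "" = String.ofList ((grid.getD y "").toList.take (pvW grid)) := by
  unfold pvRowKeys pvW at *
  rw [List.getD_eq_getElem?_getD, List.getElem?_map, List.getElem?_eq_getElem hy,
    List.getD_eq_getElem?_getD, List.getElem?_eq_getElem hy]
  rfl

theorem pvRowTake_getD (grid : List String) (y x : Nat) (hx : x < pvW grid) :
    ((grid.getD y "").toList.take (pvW grid)).getD x ' ' = pvChar grid y x := by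
  unfold pvChar
  simp [List.getD_eq_getElem?_getD, hx]

theorem pvRowKey_beq (grid : List String) (hPre : Pre_find_symmetry grid) (a b : Nat)
    (ha : a < grid.length) (hb : b < grid.length) :
    ((pvRowKeys grid).getD a "" == (pvRowKeys grid).getD b "") = pvCompareRows grid a b := by
  have hlen : ∀ y, y < grid.length →
      ((grid.getD y "").toList.take (pvW grid)).length = pvW grid := by
    intro y hy
    have hg : grid.getD y "" = grid[y] := by
      rw [List.getD_eq_getElem?_getD, List.getElem?_eq_getElem hy]; rfl
    have h2 := hPre.2 grid[y] (List.getElem_mem hy)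
    unfold pvW at *
    rw [hg, List.length_take]
    omega
  have h : ∀ x ∈ List.range (pvW grid),
      (((grid.getD a "").toList.take (pvW grid)).getD x ' '
          == ((grid.getD b "").toList.take (pvW grid)).getD x ' ')
        = (pvChar grid a x == pvChar grid b x) := by
    intro x hx; rw [List.mem_range] at hx
    rw [pvRowTake_getD grid a x hx, pvRowTake_getD grid b x hx]
  rw [pvRowKeys_getD grid a ha, pvRowKeys_getD grid b hb, Bool.eq_iff_iff, beq_iff_eq,
    String.ofList_inj, pvAllBeq _ _ (pvW grid) (hlen a ha) (hlen b hb)]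
  unfold pvCompareRows
  rw [pvAllCongr _ _ _ h]

-- ===== VERDICT (by name: the statement is the Claim_ definition above) =====
theorem find_symmetry_spec : Claim_equal_find_symmetry := by
  intro grid _ hPre
  unfold Spec_find_symmetry find_symmetry find_symmetry_alt
  obtain ⟨g1, l1, _, _, v1⟩ := pvIntern_spec (pvColKeys grid) PySem.Dict.empty [] pvGood_empty
  obtain ⟨g2, l2, _, _, v2⟩ :=
    pvIntern_spec (pvRowKeys grid) (pvIntern PySem.Dict.empty (pvColKeys grid)).1 [] g1
  simp only [List.length_nil, Nat.zero_add] at l1 l2 v1 v2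
  simp only [pvIntern] at g1 g2 l1 l2 v1 v2
  have h1 : (List.range' 1 ((grid.headD "").toList.length - 1)).find?
        (fun k => pvEdgePal (pvIntern PySem.Dict.empty (pvColKeys grid)).2 k)
      = (List.range' 1 (pvW grid - 1)).find? (fun x => pvCheckH grid x) := by
    rw [show ((grid.headD "").toList.length) = pvW grid from rfl]
    apply pvFindCongr
    intro x hx
    rw [List.mem_range'_1] at hx
    have hxw : x < pvW grid := by omega
    simp only [pvIntern]
    rw [pvEdgePal_eq _ x hx.1 (by rw [l1, pvColKeys_length]; omega)]
    rw [l1, pvColKeys_length]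
    unfold pvCheckH
    apply pvAllCongr
    intro r hr
    rw [List.mem_range'_1] at hr
    rw [pvIds_eq _ _ _ g1 v1 (x - r) (x + r - 1)
      (by rw [pvColKeys_length]; omega) (by rw [pvColKeys_length]; omega)]
    exact pvColKey_beq grid (x - r) (x + r - 1) (by omega) (by omega)
  have h2 : (List.range' 1 (grid.length - 1)).find?
        (fun k => pvEdgePal (pvIntern (pvIntern PySem.Dict.empty (pvColKeys grid)).1 (pvRowKeys grid)).2 k)
      = (List.range' 1 (grid.length - 1)).find? (fun y => pvCheckV grid y) := by
    apply pvFindCongr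
    intro y hy
    rw [List.mem_range'_1] at hy
    simp only [pvIntern]
    rw [pvEdgePal_eq _ y hy.1 (by rw [l2, pvRowKeys_length]; omega)]
    rw [l2, pvRowKeys_length]
    unfold pvCheckV
    apply pvAllCongr
    intro r hr
    rw [List.mem_range'_1] at hr
    rw [pvIds_eq _ _ _ g2 v2 (y - r) (y + r - 1)
      (by rw [pvRowKeys_length]; omega) (by rw [pvRowKeys_length]; omega)]
    exact pvRowKey_beq grid hPre (y - r) (y + r - 1) (by omega) (by omega)
  rw [h1, h2]
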